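-- pv_equiv track=rewrite | github.com/ada01325150-alt/private-skill | wxgzh-search/scripts/wechat_article_digest.py | build_digest
-- ===== SOURCE A (Python) =====
-- def build_digest(records: list[dict]) -> str:
--     lines = ["# WeChat Reading Digest", ""]
--     if not records:
--         lines.append("No article records found.")
--         return "\n".join(lines) + "\n"
--     grouped: dict[str, list[dict]] = {}
--     for record in records:
--         key = record.get("keyword") or "未分组"
--         grouped.setdefault(key, []).append(record)
--     for keyword in sorted(grouped):
--         lines.extend([f"## {keyword}", ""])
--         for record in grouped[keyword]:
--             title = record.get("title") or "Untitled"
--             account_name = record.get("account_name") or ""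
--             publish_time = record.get("publish_time") or ""
--             excerpt = record.get("excerpt") or ""
--             url = record.get("url") or ""
--             lines.append(f"### {title}")
--             if account_name:
--                 lines.append(f"- account_name: {account_name}")
--             if publish_time:
--                 lines.append(f"- publish_time: {publish_time}")
--             if url:
--                 lines.append(f"- url: {url}")
--             if excerpt:
--                 lines.extend(["", excerpt])
--             lines.append("")
--     return "\n".join(lines).strip() + "\n"
-- ===== SOURCE B (Python) =====
-- # B: no dict-of-lists index; sorted set of group keys, then a filter pass over records per key.
-- def _get_or(record, key, default):
--     v = record.get(key)
--     return v if v else default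
--
--
-- def _group_key(record):
--     return _get_or(record, "keyword", "未分组")
--
--
-- def _record_block(record):
--     account_name = _get_or(record, "account_name", "")
--     publish_time = _get_or(record, "publish_time", "")
--     url = _get_or(record, "url", "")
--     excerpt = _get_or(record, "excerpt", "")
--     block = ["### " + _get_or(record, "title", "Untitled")]
--     if account_name:
--         block.append("- account_name: " + account_name)
--     if publish_time:
--         block.append("- publish_time: " + publish_time)
--     if url:
--         block.append("- url: " + url)
--     if excerpt:
--         block.extend(["", excerpt])
--     block.append("")
--     return block
--
--
-- def build_digest(records: list[dict]) -> str:
--     lines = ["# WeChat Reading Digest", ""]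
--     if not records:
--         return "\n".join(lines + ["No article records found."]) + "\n"
--     body = []
--     for k in sorted({_group_key(r) for r in records}):
--         body += ["## " + k, ""]
--         for r in records:
--             if _group_key(r) == k:
--                 body += _record_block(r)
--     return "\n".join(lines + body).strip() + "\n"
-- ===== Notes on version B (the rewrite author's own statement) =====
-- stated objective: alternative
-- what changed: Replaces A's dict-of-lists grouping index with a sorted set of group keys followed by a per-key filter pass over the records (and factors the per-record block into a helper).
import Mathlib
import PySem

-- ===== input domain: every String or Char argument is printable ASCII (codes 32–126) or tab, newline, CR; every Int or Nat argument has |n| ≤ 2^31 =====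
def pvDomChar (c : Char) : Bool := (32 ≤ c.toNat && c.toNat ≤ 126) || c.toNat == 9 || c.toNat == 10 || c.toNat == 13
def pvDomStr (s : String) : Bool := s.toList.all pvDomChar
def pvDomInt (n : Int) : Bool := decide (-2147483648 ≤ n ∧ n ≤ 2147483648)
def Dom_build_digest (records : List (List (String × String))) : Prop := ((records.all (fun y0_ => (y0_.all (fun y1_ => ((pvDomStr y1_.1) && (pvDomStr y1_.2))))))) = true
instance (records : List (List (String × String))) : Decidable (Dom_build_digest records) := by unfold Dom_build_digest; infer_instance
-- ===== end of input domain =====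

-- B replaces A's dict-of-lists grouping index by a sorted set of keys plus a per-key filter pass (alternative decomposition, same output).

-- ===== PORT A =====
-- record.get(k) or dflt  (missing key or empty value falls back to dflt; lookup = first match)
def recGetOr (r : List (String × String)) (k dflt : String) : String :=
  match r.find? (fun p => p.1 == k) with
  | some p => if p.2 = "" then dflt else p.2
  | none => dflt

def build_digest (records : List (List (String × String))) : String :=
  let lines : List String := ["# WeChat Reading Digest", ""]
  if records = [] then
    PySem.Str.join "\n" (lines ++ ["No article records found."]) ++ "\n"
  else
    let grouped : PySem.Dict String (List (List (String × String))) :=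
      records.foldl
        (fun d record => d.modify (recGetOr record "keyword" "未分组") [] (· ++ [record]))
        PySem.Dict.empty
    let lines :=
      (PySem.List.sorted grouped.keys (fun k => k) false).foldl
        (fun lines keyword =>
          (grouped.getD keyword []).foldl
            (fun lines record =>
              let title := recGetOr record "title" "Untitled"
              let account_name := recGetOr record "account_name" ""
              let publish_time := recGetOr record "publish_time" ""
              let excerpt := recGetOr record "excerpt" ""
              let url := recGetOr record "url" ""
              let lines := lines ++ ["### " ++ title]
              let lines := if account_name ≠ "" then lines ++ ["- account_name: " ++ account_name] else lines
              let lines := if publish_time ≠ "" then lines ++ ["- publish_time: " ++ publish_time] else lines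
              let lines := if url ≠ "" then lines ++ ["- url: " ++ url] else lines
              let lines := if excerpt ≠ "" then lines ++ ["", excerpt] else lines
              lines ++ [""])
            (lines ++ ["## " ++ keyword, ""]))
        lines
    PySem.Str.strip (PySem.Str.join "\n" lines) ++ "\n"

-- ===== PORT B =====
def groupKey (record : List (String × String)) : String :=
  recGetOr record "keyword" "未分组"

def recordBlock (record : List (String × String)) : List String :=
  let account_name := recGetOr record "account_name" ""
  let publish_time := recGetOr record "publish_time" ""
  let url := recGetOr record "url" ""
  let excerpt := recGetOr record "excerpt" ""
  ["### " ++ recGetOr record "title" "Untitled"]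
    ++ (if account_name ≠ "" then ["- account_name: " ++ account_name] else [])
    ++ (if publish_time ≠ "" then ["- publish_time: " ++ publish_time] else [])
    ++ (if url ≠ "" then ["- url: " ++ url] else [])
    ++ (if excerpt ≠ "" then ["", excerpt] else [])
    ++ [""]

def build_digest_alt (records : List (List (String × String))) : String :=
  let lines : List String := ["# WeChat Reading Digest", ""]
  if records = [] then
    PySem.Str.join "\n" (lines ++ ["No article records found."]) ++ "\n"
  else
    let body :=
      (PySem.List.sorted (PySem.Set.ofList (records.map groupKey)) (fun k => k) false).flatMap
        (fun k => ["## " ++ k, ""]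
          ++ (records.filter (fun r => groupKey r == k)).flatMap recordBlock)
    PySem.Str.strip (PySem.Str.join "\n" (lines ++ body)) ++ "\n"

-- ===== PRECONDITION & SPEC =====
def Spec_build_digest (records : List (List (String × String))) (out : String) : Prop := out = build_digest_alt records
instance (records : List (List (String × String))) (out : String) : Decidable (Spec_build_digest records out) := by unfold Spec_build_digest; infer_instance

-- ===== CLAIM (what is proved, stated in full; the proofs are below) =====
def Claim_equal_build_digest : Prop := ∀ (records : List (List (String × String))), Dom_build_digest records → Spec_build_digest records (build_digest records)

-- ===== LEMMAS AND PROOFS =====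

-- A's per-record append chain is "append the record block".
theorem stepA_eq (l : List String) (record : List (String × String)) :
    (let title := recGetOr record "title" "Untitled"
     let account_name := recGetOr record "account_name" ""
     let publish_time := recGetOr record "publish_time" ""
     let excerpt := recGetOr record "excerpt" ""
     let url := recGetOr record "url" ""
     let l1 := l ++ ["### " ++ title]
     let l2 := if account_name ≠ "" then l1 ++ ["- account_name: " ++ account_name] else l1
     let l3 := if publish_time ≠ "" then l2 ++ ["- publish_time: " ++ publish_time] else l2
     let l4 := if url ≠ "" then l3 ++ ["- url: " ++ url] else l3
     let l5 := if excerpt ≠ "" then l4 ++ ["", excerpt] else l4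
     l5 ++ [""]) = l ++ recordBlock record := by
  simp only [recordBlock]
  split_ifs <;> simp

-- A's grouping dict: keys in first-occurrence order of the group keys.
theorem grouped_keys (records : List (List (String × String))) :
    (records.foldl
      (fun d record => d.modify (recGetOr record "keyword" "未分组") [] (· ++ [record]))
      (PySem.Dict.empty : PySem.Dict String (List (List (String × String))))).keys
      = PySem.Set.ofList (records.map groupKey) := by
  have h := PySem.Dict.keys_foldl_modify_key (l := records) (key := groupKey)
    (d0 := ([] : List (List (String × String))))
    (f := fun (d : PySem.Dict String (List (List (String × String)))) record => (· ++ [record]))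
    (d := PySem.Dict.empty)
  simp only [groupKey] at h ⊢
  rw [h]
  simp [PySem.Dict.keys_empty, PySem.Set.update_nil_left]

-- A's grouping dict: grouped[k] is the in-order filter of the records with key k.
theorem grouped_getD (records : List (List (String × String))) (k : String) :
    (records.foldl
      (fun d record => d.modify (recGetOr record "keyword" "未分组") [] (· ++ [record]))
      (PySem.Dict.empty : PySem.Dict String (List (List (String × String))))).getD k []
      = records.filter (fun r => groupKey r == k) := by
  have hmap : records.foldl
      (fun d record => d.modify (recGetOr record "keyword" "未分组") [] (· ++ [record]))
      (PySem.Dict.empty : PySem.Dict String (List (List (String × String))))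
      = (records.map (fun r => (groupKey r, r))).foldl
          (fun d p => d.modify p.1 [] (· ++ [p.2])) PySem.Dict.empty := by
    rw [List.foldl_map]; rfl
  rw [hmap, PySem.Dict.getD_foldl_modify_append]
  simp [PySem.Dict.getD_empty, List.filter_map, Function.comp_def]

-- ===== VERDICT (by name: the statement is the Claim_ definition above) =====
theorem build_digest_spec : Claim_equal_build_digest := by
  intro records _
  unfold Spec_build_digest build_digest build_digest_alt
  by_cases h : records = []
  · simp [h]
  · simp only [h, reduceIte]
    apply congrArg (f := fun L => PySem.Str.strip (PySem.Str.join "\n" L) ++ "\n")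
    rw [grouped_keys]
    rw [PySem.List.foldl_congr_mem
      (g := fun (acc : List String) k =>
        acc ++ (["## " ++ k, ""]
          ++ (records.filter (fun r => groupKey r == k)).flatMap recordBlock))]
    · rw [PySem.List.foldl_append_eq_flatMap]
    · intro acc k _
      rw [grouped_getD]
      rw [PySem.List.foldl_congr_mem
        (g := fun (l : List String) record => l ++ recordBlock record)]
      · rw [PySem.List.foldl_append_eq_flatMap]
        simp
      · intro l record _
        exact stepA_eq l record
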